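-- pv_equiv track=rewrite | github.com/omiq/rgc-basic | tools/rgc2ugb/emit.py | _lowercase_identifiers
-- ===== SOURCE A (Python) =====
-- _KEEP_UPPERCASE = frozenset({
--     "PRINT", "INPUT", "LET", "REM", "IF", "THEN", "ELSE", "ELSEIF",
--     "ENDIF", "END", "FOR", "NEXT", "STEP", "TO", "WHILE", "WEND",
--     "DO", "LOOP", "UNTIL", "EXIT", "GOTO", "GOSUB", "RETURN", "ON",
--     "STOP", "DIM", "AS", "READ", "DATA", "RESTORE", "CLR", "CLS",
--     "AND", "OR", "NOT", "XOR", "MOD",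
--     "RND", "INT", "ABS", "SGN", "SIN", "COS", "TAN", "SQR", "EXP",
--     "LOG", "CHR", "STR", "VAL", "LEN", "LEFT", "RIGHT", "MID",
--     "INSTR", "UCASE", "LCASE", "STRING", "TRIM", "LTRIM", "RTRIM",
--     "ASC", "TAB", "SPC", "HEX", "DEC", "TI", "INKEY",
--     "SCREEN", "BITMAP", "TILEMAP", "ENABLE", "DISABLE",
--     "EMPTY", "TILE", "EMPTYTILE",
--     "PARALLEL", "SPAWN", "CALL",
--     "COLOR", "COLOUR", "INK", "PAPER", "BORDER", "BACKGROUND",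
--     "LOCATE", "SLEEP", "WAIT", "VBL", "MS", "CYCLES",
--     "BAR", "BOX", "CIRCLE", "FCIRCLE", "ELLIPSE", "FELLIPSE",
--     "PLOT", "LINE", "DRAW", "DRAWTEXT", "PSET", "PRESET",
--     "FILLRECT", "FILLCIRCLE", "FILLELLIPSE", "RECT",
--     "POKE", "PEEK", "MEMSET", "MEMCPY",
--     "SPRITE", "SPRITES", "AT", "KEY", "STATE", "JOY", "JOYSTICK",
--     "FIRE", "KEYDOWN", "KEYUP", "KEYPRESS",
--     "IMAGE", "ATLAS", "FRAME", "SIZE", "LOAD", "SAVE",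
--     "WIDTH", "HEIGHT",
--     "PROCEDURE", "PROC", "CONST", "DEF", "DEFINE", "FN", "FUNCTION",
--     "SHARED", "GLOBAL", "BYTE", "WORD", "DWORD", "POSITION",
--     "FLOAT", "DOUBLE", "ADDRESS", "SIGNED", "UNSIGNED",
--     "SCREEN_WIDTH", "SCREEN_HEIGHT", "OPTION", "INCLUDE",
--     "PETSCII", "LOWER", "UPPER",
--     "BLACK", "WHITE", "RED", "CYAN", "PURPLE", "GREEN", "BLUE",
--     "YELLOW", "ORANGE", "BROWN", "PINK",
--     "TRUE", "FALSE", "PI",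
--     # ugBASIC v1.18 additions
--     "MAX", "MIN", "FLASH", "TRIANGLE", "BITMAPADDRESS",
--     "RESET", "ERROR", "CHAIN",
--     "BEGIN", "COPPER", "MOVE", "STORE",
--     "NUMBER", "MSPRITE",
--     "ARRAY", "CHECK", "GET", "PUT", "REU",
-- })
--
-- def _lowercase_identifiers(line: str) -> str:
--     """Lowercase tokens not in _KEEP_UPPERCASE. String literals pass
--     through verbatim. Used to make rgc-basic ALL-CAPS identifiers
--     (variables, labels) compatible with ugBASIC's case-sensitive
--     `[a-z_]...` identifier rule."""
--     out = []
--     in_string = False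
--     i = 0
--     n = len(line)
--     while i < n:
--         c = line[i]
--         if in_string:
--             out.append(c)
--             if c == '"':
--                 in_string = False
--             elif c == "\\" and i + 1 < n:
--                 out.append(line[i + 1])
--                 i += 2
--                 continue
--             i += 1
--             continue
--         if c == '"':
--             in_string = True
--             out.append(c)
--             i += 1
--             continue
--         if c.isalpha() or c == "_":
--             j = i + 1
--             while j < n and (line[j].isalnum() or line[j] == "_"):
--                 j += 1
--             if j < n and line[j] == "$":
--                 j += 1
--             tok = line[i:j]
--             strip_dollar = tok.rstrip("$")
--             if strip_dollar.upper() in _KEEP_UPPERCASE: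
--                 out.append(strip_dollar.upper() + ("$" if tok.endswith("$") else ""))
--             else:
--                 out.append(tok.lower())
--             i = j
--             continue
--         out.append(c)
--         i += 1
--     return "".join(out)
-- ===== SOURCE B (Python) =====
-- _KEEP_UPPERCASE = frozenset({
--     "PRINT", "INPUT", "LET", "REM", "IF", "THEN", "ELSE", "ELSEIF",
--     "ENDIF", "END", "FOR", "NEXT", "STEP", "TO", "WHILE", "WEND",
--     "DO", "LOOP", "UNTIL", "EXIT", "GOTO", "GOSUB", "RETURN", "ON",
--     "STOP", "DIM", "AS", "READ", "DATA", "RESTORE", "CLR", "CLS",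
--     "AND", "OR", "NOT", "XOR", "MOD",
--     "RND", "INT", "ABS", "SGN", "SIN", "COS", "TAN", "SQR", "EXP",
--     "LOG", "CHR", "STR", "VAL", "LEN", "LEFT", "RIGHT", "MID",
--     "INSTR", "UCASE", "LCASE", "STRING", "TRIM", "LTRIM", "RTRIM",
--     "ASC", "TAB", "SPC", "HEX", "DEC", "TI", "INKEY",
--     "SCREEN", "BITMAP", "TILEMAP", "ENABLE", "DISABLE",
--     "EMPTY", "TILE", "EMPTYTILE",
--     "PARALLEL", "SPAWN", "CALL",
--     "COLOR", "COLOUR", "INK", "PAPER", "BORDER", "BACKGROUND",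
--     "LOCATE", "SLEEP", "WAIT", "VBL", "MS", "CYCLES",
--     "BAR", "BOX", "CIRCLE", "FCIRCLE", "ELLIPSE", "FELLIPSE",
--     "PLOT", "LINE", "DRAW", "DRAWTEXT", "PSET", "PRESET",
--     "FILLRECT", "FILLCIRCLE", "FILLELLIPSE", "RECT",
--     "POKE", "PEEK", "MEMSET", "MEMCPY",
--     "SPRITE", "SPRITES", "AT", "KEY", "STATE", "JOY", "JOYSTICK",
--     "FIRE", "KEYDOWN", "KEYUP", "KEYPRESS",
--     "IMAGE", "ATLAS", "FRAME", "SIZE", "LOAD", "SAVE",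
--     "WIDTH", "HEIGHT",
--     "PROCEDURE", "PROC", "CONST", "DEF", "DEFINE", "FN", "FUNCTION",
--     "SHARED", "GLOBAL", "BYTE", "WORD", "DWORD", "POSITION",
--     "FLOAT", "DOUBLE", "ADDRESS", "SIGNED", "UNSIGNED",
--     "SCREEN_WIDTH", "SCREEN_HEIGHT", "OPTION", "INCLUDE",
--     "PETSCII", "LOWER", "UPPER",
--     "BLACK", "WHITE", "RED", "CYAN", "PURPLE", "GREEN", "BLUE",
--     "YELLOW", "ORANGE", "BROWN", "PINK",
--     "TRUE", "FALSE", "PI",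
--     "MAX", "MIN", "FLASH", "TRIANGLE", "BITMAPADDRESS",
--     "RESET", "ERROR", "CHAIN",
--     "BEGIN", "COPPER", "MOVE", "STORE",
--     "NUMBER", "MSPRITE",
--     "ARRAY", "CHECK", "GET", "PUT", "REU",
-- })
--
--
-- def _take_string(cs):
--     """Consume a string-literal body (chars after the opening quote) up to
--     and including the closing quote; a backslash carries the next char
--     verbatim; an unterminated literal runs to end of line.
--     Returns (consumed_text, remaining_chars)."""
--     taken = []
--     while cs:
--         c, cs = cs[0], cs[1:]
--         taken.append(c)
--         if c == '"':
--             break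
--         if c == '\\' and cs:
--             taken.append(cs[0])
--             cs = cs[1:]
--     return "".join(taken), cs
--
--
-- def _lowercase_identifiers(line: str) -> str:
--     """Recursive-descent tokenizer: string literal / identifier / other
--     char, rebuilt piece by piece (no in_string flag, no index arithmetic)."""
--     pieces = []
--     cs = list(line)
--     while cs:
--         c = cs[0]
--         if c == '"':
--             lit, cs = _take_string(cs[1:])
--             pieces.append('"' + lit)
--         elif c.isalpha() or c == '_':
--             k = 1
--             while k < len(cs) and (cs[k].isalnum() or cs[k] == '_'):
--                 k += 1
--             stem, cs = "".join(cs[:k]), cs[k:]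
--             dollar = ''
--             if cs and cs[0] == '$':
--                 dollar, cs = '$', cs[1:]
--             up = stem.upper()
--             pieces.append(up + dollar if up in _KEEP_UPPERCASE
--                           else (stem + dollar).lower())
--         else:
--             pieces.append(c)
--             cs = cs[1:]
--     return "".join(pieces)
-- ===== Notes on version B (the rewrite author's own statement) =====
-- stated objective: idiomatic
-- what changed: Replaced A's flat index/while state machine (in_string flag, manual i/j arithmetic and rstrip/endswith post-processing) with a recursive-descent tokenizer: a dedicated string-literal consumer and an identifier-span step emit one piece per token, which are joined at the end.
import Mathlib
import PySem

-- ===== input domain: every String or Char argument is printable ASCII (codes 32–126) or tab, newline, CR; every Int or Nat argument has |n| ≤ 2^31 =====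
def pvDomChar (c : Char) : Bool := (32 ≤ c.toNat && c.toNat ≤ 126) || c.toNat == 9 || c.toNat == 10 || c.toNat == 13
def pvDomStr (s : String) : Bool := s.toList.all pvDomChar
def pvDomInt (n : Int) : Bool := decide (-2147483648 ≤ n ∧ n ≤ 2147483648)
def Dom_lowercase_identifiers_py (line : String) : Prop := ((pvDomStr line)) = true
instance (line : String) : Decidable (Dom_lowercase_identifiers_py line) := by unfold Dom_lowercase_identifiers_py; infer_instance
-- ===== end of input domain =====

-- B replaces A's flat index/while DFA (in_string flag, manual i/j arithmetic) by a
-- recursive-descent tokenizer (string-literal consumer + identifier span) — objective: idiomatic; no speed claim.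

-- _KEEP_UPPERCASE, shared data of both ports
def pvKeywords : List String := [
  "PRINT", "INPUT", "LET", "REM", "IF", "THEN", "ELSE", "ELSEIF",
  "ENDIF", "END", "FOR", "NEXT", "STEP", "TO", "WHILE", "WEND",
  "DO", "LOOP", "UNTIL", "EXIT", "GOTO", "GOSUB", "RETURN", "ON",
  "STOP", "DIM", "AS", "READ", "DATA", "RESTORE", "CLR", "CLS",
  "AND", "OR", "NOT", "XOR", "MOD",
  "RND", "INT", "ABS", "SGN", "SIN", "COS", "TAN", "SQR", "EXP",
  "LOG", "CHR", "STR", "VAL", "LEN", "LEFT", "RIGHT", "MID",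
  "INSTR", "UCASE", "LCASE", "STRING", "TRIM", "LTRIM", "RTRIM",
  "ASC", "TAB", "SPC", "HEX", "DEC", "TI", "INKEY",
  "SCREEN", "BITMAP", "TILEMAP", "ENABLE", "DISABLE",
  "EMPTY", "TILE", "EMPTYTILE",
  "PARALLEL", "SPAWN", "CALL",
  "COLOR", "COLOUR", "INK", "PAPER", "BORDER", "BACKGROUND",
  "LOCATE", "SLEEP", "WAIT", "VBL", "MS", "CYCLES",
  "BAR", "BOX", "CIRCLE", "FCIRCLE", "ELLIPSE", "FELLIPSE",
  "PLOT", "LINE", "DRAW", "DRAWTEXT", "PSET", "PRESET",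
  "FILLRECT", "FILLCIRCLE", "FILLELLIPSE", "RECT",
  "POKE", "PEEK", "MEMSET", "MEMCPY",
  "SPRITE", "SPRITES", "AT", "KEY", "STATE", "JOY", "JOYSTICK",
  "FIRE", "KEYDOWN", "KEYUP", "KEYPRESS",
  "IMAGE", "ATLAS", "FRAME", "SIZE", "LOAD", "SAVE",
  "WIDTH", "HEIGHT",
  "PROCEDURE", "PROC", "CONST", "DEF", "DEFINE", "FN", "FUNCTION",
  "SHARED", "GLOBAL", "BYTE", "WORD", "DWORD", "POSITION",
  "FLOAT", "DOUBLE", "ADDRESS", "SIGNED", "UNSIGNED",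
  "SCREEN_WIDTH", "SCREEN_HEIGHT", "OPTION", "INCLUDE",
  "PETSCII", "LOWER", "UPPER",
  "BLACK", "WHITE", "RED", "CYAN", "PURPLE", "GREEN", "BLUE",
  "YELLOW", "ORANGE", "BROWN", "PINK",
  "TRUE", "FALSE", "PI",
  "MAX", "MIN", "FLASH", "TRIANGLE", "BITMAPADDRESS",
  "RESET", "ERROR", "CHAIN",
  "BEGIN", "COPPER", "MOVE", "STORE",
  "NUMBER", "MSPRITE",
  "ARRAY", "CHECK", "GET", "PUT", "REU"]

-- ===== PORT A =====
-- A's inner `j = i + 1; while j < n and (line[j].isalnum() or line[j] == "_")` scan,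
-- as the obvious structural recursion on the suffix after position i
def identScanA : List Char → List Char × List Char
  | [] => ([], [])
  | c :: cs =>
    if PySem.Chars.isalnum c || c = '_' then
      let p := identScanA cs
      (c :: p.1, p.2)
    else ([], c :: cs)

-- A's `if j < n and line[j] == "$": j += 1; tok = line[i:j]` applied after the scan:
-- returns (tok, suffix after tok), given head char c and the suffix after it
def tokA (c : Char) (rest : List Char) : List Char × List Char :=
  match identScanA rest with
  | (m, '$' :: r1) => (c :: (m ++ ['$']), r1)
  | (m, r0) => (c :: m, r0)

-- tok.rstrip("$"), ported by hand (exact: strips all trailing '$')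
def rstripDollar (cs : List Char) : List Char :=
  (cs.reverse.dropWhile (· = '$')).reverse

theorem identScanA_snd_le (cs : List Char) : (identScanA cs).2.length ≤ cs.length := by
  induction cs with
  | nil => simp [identScanA]
  | cons c cs ih =>
    simp only [identScanA]
    split <;> simp <;> omega

theorem tokA_snd_lt (c : Char) (rest : List Char) :
    (tokA c rest).2.length < (c :: rest).length := by
  have h := identScanA_snd_le rest
  unfold tokA
  rcases hs : identScanA rest with ⟨m, r0⟩
  rw [hs] at h
  match r0 with
  | '$' :: r1 => simp at h ⊢; omega
  | [] => simp at h ⊢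
  | c' :: r1 =>
    by_cases hc : c' = '$'
    · subst hc; simp at h ⊢; omega
    · simp [hc] at h ⊢
      omega

-- A's `while i < n` loop: state = (in_string, suffix of line at index i);
-- the out list is produced by the recursion
def lowerA : Bool → List Char → List Char
  | _, [] => []
  | true, c :: rest =>
    if c = '"' then c :: lowerA false rest
    else if c = '\\' then
      match rest with
      | d :: rest2 => c :: d :: lowerA true rest2
      | [] => c :: lowerA true []
    else c :: lowerA true rest
  | false, c :: rest =>
    if c = '"' then c :: lowerA true rest
    else if PySem.Chars.isalpha c || c = '_' then
      let tok := (tokA c rest).1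
      let strip := rstripDollar tok
      (if String.mk (PySem.Chars.upper strip) ∈ pvKeywords then
         PySem.Chars.upper strip ++ (if PySem.Chars.endswith tok ['$'] then ['$'] else [])
       else PySem.Chars.lower tok) ++ lowerA false (tokA c rest).2
    else c :: lowerA false rest
  termination_by b cs => (cs.length, if b then 0 else 1)
  decreasing_by
  all_goals exact Prod.Lex.left _ _ (by first | exact tokA_snd_lt c rest | (simp only [List.length_cons, List.length_nil]; omega))

def lowercase_identifiers_py (line : String) : String :=
  String.mk (lowerA false line.toList)

-- ===== PORT B =====
-- B's _take_string: consume a string-literal body up to and including the closing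
-- quote (backslash carries the next char; unterminated runs to end of line)
def takeStringB : List Char → List Char × List Char
  | [] => ([], [])
  | c :: cs =>
    if c = '"' then ([c], cs)
    else if c = '\\' then
      match cs with
      | d :: cs2 => let p := takeStringB cs2; (c :: d :: p.1, p.2)
      | [] => ([c], [])
    else let p := takeStringB cs; (c :: p.1, p.2)

theorem takeStringB_snd_le (cs : List Char) : (takeStringB cs).2.length ≤ cs.length := by
  match cs with
  | [] => simp [takeStringB]
  | c :: cs =>
    by_cases h1 : c = '"'
    · rw [takeStringB.eq_def]; simp [h1]
    · by_cases h2 : c = '\\'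
      · match cs with
        | [] => rw [takeStringB.eq_def]; simp [h1, h2]
        | d :: cs2 =>
          have ih := takeStringB_snd_le cs2
          rw [takeStringB.eq_def]; simp [h1, h2]; omega
      · have ih := takeStringB_snd_le cs
        rw [takeStringB.eq_def]; simp [h1, h2]; omega
  termination_by cs.length

-- B's `dollar` step: split one optional leading '$' off the remainder
def dollarSplitB (r0 : List Char) : List Char × List Char :=
  match r0 with
  | '$' :: r1 => (['$'], r1)
  | _ => ([], r0)

theorem dollarSplitB_snd_le (r0 : List Char) : (dollarSplitB r0).2.length ≤ r0.length := by
  unfold dollarSplitB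
  match r0 with
  | '$' :: r1 => simp
  | [] => simp
  | c :: r1 =>
    by_cases hc : c = '$'
    · subst hc; simp
    · simp [hc]

-- B's main loop: emit one piece per token (string literal / identifier / other char)
def emitB : List Char → List (List Char)
  | [] => []
  | c :: cs =>
    if c = '"' then
      ('"' :: (takeStringB cs).1) :: emitB (takeStringB cs).2
    else if PySem.Chars.isalpha c || c = '_' then
      let stem := c :: cs.takeWhile (fun ch => PySem.Chars.isalnum ch || ch = '_')
      let r0 := cs.dropWhile (fun ch => PySem.Chars.isalnum ch || ch = '_')
      let dollar := (dollarSplitB r0).1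
      let up := PySem.Chars.upper stem
      (if String.mk up ∈ pvKeywords then up ++ dollar
       else PySem.Chars.lower (stem ++ dollar)) :: emitB (dollarSplitB r0).2
    else [c] :: emitB cs
  termination_by cs => cs.length
  decreasing_by
  · have := takeStringB_snd_le cs; simp; omega
  · have h1 := dollarSplitB_snd_le (cs.dropWhile (fun ch => PySem.Chars.isalnum ch || ch = '_'))
    have h2 := List.length_dropWhile_le (fun ch => PySem.Chars.isalnum ch || ch = '_') cs
    simp; omega
  · simp

def lowercase_identifiers_py_alt (line : String) : String :=
  String.mk (emitB line.toList).flatten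

-- ===== PRECONDITION & SPEC =====
def Spec_lowercase_identifiers_py (line : String) (out : String) : Prop := out = lowercase_identifiers_py_alt line
instance (line : String) (out : String) : Decidable (Spec_lowercase_identifiers_py line out) := by unfold Spec_lowercase_identifiers_py; infer_instance

-- ===== CLAIM (what is proved, stated in full; the proofs are below) =====
def Claim_equal_lowercase_identifiers_py : Prop := ∀ (line : String), Dom_lowercase_identifiers_py line → Spec_lowercase_identifiers_py line (lowercase_identifiers_py line)

-- ===== LEMMAS AND PROOFS =====

-- the A-side identifier scan is takeWhile/dropWhile of the same predicate
theorem identScanA_eq (cs : List Char) :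
    identScanA cs = (cs.takeWhile (fun ch => PySem.Chars.isalnum ch || ch = '_'),
                     cs.dropWhile (fun ch => PySem.Chars.isalnum ch || ch = '_')) := by
  induction cs with
  | nil => simp [identScanA]
  | cons c cs ih =>
    by_cases h : (PySem.Chars.isalnum c || decide (c = '_')) = true
    · simp [identScanA, h, ih, List.takeWhile_cons, List.dropWhile_cons]
    · simp [identScanA, h, List.takeWhile_cons, List.dropWhile_cons]

theorem rstripDollar_append_dollar (l : List Char) :
    rstripDollar (l ++ ['$']) = rstripDollar l := by
  simp [rstripDollar, List.dropWhile]

theorem rstripDollar_no_dollar (l : List Char) (h : ∀ x ∈ l, x ≠ '$') :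
    rstripDollar l = l := by
  unfold rstripDollar
  match hl : l.reverse with
  | [] => simp_all
  | x :: t =>
    have hx : x ∈ l := by rw [← List.mem_reverse, hl]; exact List.mem_cons_self
    rw [List.dropWhile_cons_of_neg (by simpa using h x hx), ← hl, List.reverse_reverse]

theorem endswith_dollar_append (l : List Char) :
    PySem.Chars.endswith (l ++ ['$']) ['$'] = true := by
  rw [PySem.Chars.endswith_iff]
  exact List.suffix_append l ['$']

theorem endswith_dollar_no (l : List Char) (h : ∀ x ∈ l, x ≠ '$') :
    PySem.Chars.endswith l ['$'] = false := by
  by_contra hb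
  have : ['$'] <:+ l := PySem.Chars.endswith_iff l ['$'] |>.mp (by simpa using hb)
  rcases this with ⟨t, ht⟩
  have : '$' ∈ l := by rw [← ht]; simp
  exact h _ this rfl

-- A's string-mode loop is B's _take_string followed by the normal-mode loop
theorem lowerA_true_eq (cs : List Char) :
    lowerA true cs = (takeStringB cs).1 ++ lowerA false (takeStringB cs).2 := by
  match cs with
  | [] => simp [lowerA, takeStringB]
  | c :: rest =>
    by_cases h1 : c = '"'
    · rw [lowerA.eq_def, takeStringB.eq_def]; simp [h1]
    · by_cases h2 : c = '\\'
      · match rest with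
        | [] =>
          rw [lowerA.eq_def, takeStringB.eq_def]
          simp [h1, h2, lowerA]
        | d :: rest2 =>
          have ih := lowerA_true_eq rest2
          rw [lowerA.eq_def, takeStringB.eq_def]
          simp [h1, h2, ih]
      · have ih := lowerA_true_eq rest
        rw [lowerA.eq_def, takeStringB.eq_def]
        simp [h1, h2, ih]
  termination_by cs.length

theorem main_lemma (cs : List Char) : lowerA false cs = (emitB cs).flatten := by
  match cs with
  | [] => simp [lowerA, emitB]
  | c :: rest =>
    by_cases h1 : c = '"'
    · have ih := main_lemma (takeStringB rest).2
      rw [lowerA.eq_def, emitB.eq_def]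
      simp [h1, lowerA_true_eq, ih]
    · by_cases h2 : (PySem.Chars.isalpha c || decide (c = '_')) = true
      · have hlen := List.length_dropWhile_le (fun ch => PySem.Chars.isalnum ch || ch = '_') rest
        have ih := main_lemma (dollarSplitB (rest.dropWhile (fun ch => PySem.Chars.isalnum ch || ch = '_'))).2
        have hcd : c ≠ '$' := by intro hc; subst hc; exact absurd h2 (by decide)
        have hmd : ∀ x ∈ rest.takeWhile (fun ch => PySem.Chars.isalnum ch || ch = '_'), x ≠ '$' := by
          intro x hx hxe
          have := List.mem_takeWhile_imp hx
          subst hxe; exact absurd this (by decide)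
        have hnd : ∀ x ∈ c :: rest.takeWhile (fun ch => PySem.Chars.isalnum ch || ch = '_'), x ≠ '$' := by
          intro x hx; rcases List.mem_cons.mp hx with h | h
          · subst h; exact hcd
          · exact hmd x h
        rw [lowerA.eq_def, emitB.eq_def]
        simp only [h1, h2, if_false, if_true, ite_false, ite_true, if_neg h1, if_pos h2]
        unfold tokA
        rw [identScanA_eq]
        rcases h0 : rest.dropWhile (fun ch => PySem.Chars.isalnum ch || ch = '_') with _ | ⟨c0, r1⟩
        · rw [h0] at ih
          simp only [dollarSplitB] at ih ⊢
          rw [rstripDollar_no_dollar _ hnd, endswith_dollar_no _ hnd, ih]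
          simp
        · by_cases hc0 : c0 = '$'
          · subst hc0
            rw [h0] at ih
            simp only [dollarSplitB] at ih ⊢
            have e1 : rstripDollar (c :: (rest.takeWhile (fun ch => PySem.Chars.isalnum ch || ch = '_') ++ ['$']))
                = c :: rest.takeWhile (fun ch => PySem.Chars.isalnum ch || ch = '_') := by
              have := rstripDollar_append_dollar (c :: rest.takeWhile (fun ch => PySem.Chars.isalnum ch || ch = '_'))
              simpa using this.trans (rstripDollar_no_dollar _ hnd)
            have e2 : PySem.Chars.endswith (c :: (rest.takeWhile (fun ch => PySem.Chars.isalnum ch || ch = '_') ++ ['$'])) ['$'] = true := by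
              simpa using endswith_dollar_append (c :: rest.takeWhile (fun ch => PySem.Chars.isalnum ch || ch = '_'))
            rw [e1, e2, ih]
            simp
          · rw [h0] at ih
            have hsp : dollarSplitB (c0 :: r1) = ([], c0 :: r1) := by
              unfold dollarSplitB
              split
              · rename_i heq; rw [List.cons.injEq] at heq; exact absurd heq.1 hc0
              · rfl
            rw [hsp] at ih
            rw [hsp]
            split
            · rename_i heq
              rw [Prod.mk.injEq, List.cons.injEq] at heq
              exact absurd heq.2.1 hc0
            · rename_i m' r0' heq
              rw [Prod.mk.injEq] at heq
              rw [← heq.1, ← heq.2] at *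
              rw [rstripDollar_no_dollar _ hnd, endswith_dollar_no _ hnd, ih]
              simp
      · have ih := main_lemma rest
        rw [lowerA.eq_def, emitB.eq_def]
        simp [h1, h2, ih]
  termination_by cs.length
  decreasing_by
  · have := takeStringB_snd_le rest; simp; omega
  · have := dollarSplitB_snd_le (rest.dropWhile (fun ch => PySem.Chars.isalnum ch || ch = '_')); simp; omega
  · simp

-- ===== VERDICT (by name: the statement is the Claim_ definition above) =====
theorem lowercase_identifiers_py_spec : Claim_equal_lowercase_identifiers_py := by
  intro line _
  unfold Spec_lowercase_identifiers_py lowercase_identifiers_py lowercase_identifiers_py_alt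
  rw [main_lemma]
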